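-- pv_equiv track=rewrite | github.com/akikuno/DAJIN2 | src/DAJIN2/core/preprocess/replace_NtoD.py | _replaceNtoD
-- ===== SOURCE A (Python) =====
-- def _replaceNtoD(cssplits_sample, sequence) -> list[list[str]]:
--     cssplits_replaced = cssplits_sample.copy()
--     for i, cssplits in enumerate(cssplits_sample):
--         # extract right/left index of the end of sequential Ns
--         left_idx_n = 0
--         for cs in cssplits:
--             if cs != "N":
--                 break
--             left_idx_n += 1
--         right_idx_n = 0
--         for cs in cssplits[::-1]:
--             if cs != "N":
--                 break
--             right_idx_n += 1
--         right_idx_n = len(cssplits) - right_idx_n - 1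
--         # replace sequential Ns within the sequence
--         for j, (cs, seq) in enumerate(zip(cssplits, sequence)):
--             if left_idx_n <= j <= right_idx_n and cs == "N":
--                 cssplits_replaced[i][j] = f"-{seq}"
--     return cssplits_replaced
-- ===== SOURCE B (Python) =====
-- def _replaceNtoD(cssplits_sample, sequence) -> list[list[str]]:
--     # Shallow outer copy; inner lists are mutated in place, like the original.
--     out = list(cssplits_sample)
--     for row in cssplits_sample:
--         # Single forward streaming pass: buffer the "N" indices seen since the
--         # last non-"N"; a non-"N" closes the run, so flush the buffer.  Leading
--         # Ns are never buffered (no non-"N" seen yet) and trailing Ns are never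
--         # flushed (no closing non-"N"), so exactly the interior Ns are written.
--         seen = False
--         pending = []
--         for j, cs in enumerate(row):
--             if cs == "N":
--                 if seen:
--                     pending.append(j)
--             else:
--                 for k in pending:
--                     if k < len(sequence):
--                         row[k] = f"-{sequence[k]}"
--                 pending.clear()
--                 seen = True
--     return out
-- ===== Notes on version B (the rewrite author's own statement) =====
-- stated objective: alternative
-- what changed: Replaces A's three staged scans per row (leading-N count, trailing-N count over the reversed list, then a bound-guarded enumerate(zip(...)) write loop) with one forward streaming pass per row that buffers the indices of each run of Ns and flushes the buffer when a non-'N' closes the run, so no bounds are ever computed.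
import Mathlib
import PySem

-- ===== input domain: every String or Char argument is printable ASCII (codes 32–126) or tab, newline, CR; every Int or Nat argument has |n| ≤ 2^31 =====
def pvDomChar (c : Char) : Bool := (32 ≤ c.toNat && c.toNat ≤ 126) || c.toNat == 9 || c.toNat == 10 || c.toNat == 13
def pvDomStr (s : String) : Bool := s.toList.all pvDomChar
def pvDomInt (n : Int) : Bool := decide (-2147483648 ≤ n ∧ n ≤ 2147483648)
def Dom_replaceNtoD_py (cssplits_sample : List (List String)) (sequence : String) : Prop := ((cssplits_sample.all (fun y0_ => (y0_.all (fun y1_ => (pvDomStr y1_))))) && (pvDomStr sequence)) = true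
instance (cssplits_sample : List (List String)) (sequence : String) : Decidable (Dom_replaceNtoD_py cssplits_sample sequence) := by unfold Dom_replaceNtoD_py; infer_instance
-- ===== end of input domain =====

-- B replaces A's three staged per-row scans (leading/trailing-N counts and the bounded
-- write loop) by one forward streaming pass with a pending buffer of N-run indices
-- (same return value; like A it mutates the shared inner lists in place).


-- ===== PORT A =====
-- 'left_idx_n': count of leading "N"s (the Python loop breaks at the first non-"N")
def pvLeadingN : List String → Nat
  | [] => 0
  | cs :: rest => if cs ≠ "N" then 0 else pvLeadingN rest + 1

-- one row of A: bounds from the two directional scans, then the enumerate(zip(...)) write loop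
def pvRowA (cssplits : List String) (seq : List Char) : List String :=
  let left : Int := pvLeadingN cssplits
  let right : Int := (cssplits.length : Int) - pvLeadingN cssplits.reverse - 1
  ((List.zip cssplits seq).zipIdx).foldl
    (fun acc x =>
      if left ≤ (x.2 : Int) ∧ (x.2 : Int) ≤ right ∧ x.1.1 = "N"
      then acc.set x.2 ("-" ++ String.mk [x.1.2]) else acc)
    cssplits

def replaceNtoD_py (cssplits_sample : List (List String)) (sequence : String) : List (List String) :=
  cssplits_sample.map (fun cssplits => pvRowA cssplits sequence.toList)

-- ===== PORT B =====
-- one step of B's streaming pass: state = (row so far, seen a non-"N", pending N indices);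
-- an "N" is buffered (once something non-"N" was seen), a non-"N" flushes the buffer
def pvStepB (seq : List Char) (st : List String × Bool × List Nat) (x : String × Nat) :
    List String × Bool × List Nat :=
  if x.1 = "N" then
    if st.2.1 then (st.1, st.2.1, st.2.2 ++ [x.2]) else st
  else
    (st.2.2.foldl
      (fun acc k => if k < seq.length
                    then acc.set k ("-" ++ String.mk [seq.getD k ' ']) else acc) st.1,
     true, [])

def pvRowB (row : List String) (seq : List Char) : List String :=
  (row.zipIdx.foldl (pvStepB seq) (row, false, [])).1

def replaceNtoD_py_alt (cssplits_sample : List (List String)) (sequence : String) : List (List String) :=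
  cssplits_sample.map (fun row => pvRowB row sequence.toList)

-- ===== PRECONDITION & SPEC =====
def Spec_replaceNtoD_py (cssplits_sample : List (List String)) (sequence : String) (out : List (List String)) : Prop := out = replaceNtoD_py_alt cssplits_sample sequence
instance (cssplits_sample : List (List String)) (sequence : String) (out : List (List String)) : Decidable (Spec_replaceNtoD_py cssplits_sample sequence out) := by unfold Spec_replaceNtoD_py; infer_instance

-- ===== CLAIM (what is proved, stated in full; the proofs are below) =====
def Claim_equal_replaceNtoD_py : Prop := ∀ (cssplits_sample : List (List String)) (sequence : String), Dom_replaceNtoD_py cssplits_sample sequence → Spec_replaceNtoD_py cssplits_sample sequence (replaceNtoD_py cssplits_sample sequence)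

-- ===== LEMMAS AND PROOFS =====

-- a fold writing v j at indices, described pointwise
theorem pvFoldlSet_getElem? {α : Type} (c : Nat → Prop) [DecidablePred c] (v : Nat → α) :
    ∀ (js : List Nat) (acc : List α), (∀ j ∈ js, j < acc.length) → ∀ k : Nat,
      (js.foldl (fun a j => if c j then a.set j (v j) else a) acc)[k]? =
        if k ∈ js ∧ c k then some (v k) else acc[k]? := by
  intro js
  induction js with
  | nil => intro acc _ k; simp
  | cons j js ih =>
      intro acc h k
      have hlen : (if c j then acc.set j (v j) else acc).length = acc.length := by
        split <;> simp
      have h' : ∀ i ∈ js, i < (if c j then acc.set j (v j) else acc).length := by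
        intro i hi; rw [hlen]; exact h i (List.mem_cons_of_mem _ hi)
      rw [List.foldl_cons, ih _ h' k]
      by_cases hk : k ∈ js ∧ c k
      · simp [hk, List.mem_cons]
      · simp only [if_neg hk]
        by_cases hkj : k = j
        · subst hkj
          by_cases hc : c k
          · have hklen : k < acc.length := h k (List.mem_cons_self ..)
            simp [hc, List.getElem?_set, hklen, hk]
          · simp [hc, hk, List.mem_cons]
        · have : ¬ (k ∈ j :: js ∧ c k) := by
            rintro ⟨hm, hc⟩
            rcases List.mem_cons.mp hm with h1 | h1
            · exact hkj h1
            · exact hk ⟨h1, hc⟩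
          simp only [if_neg this]
          split
          · rw [List.getElem?_set]; simp [Ne.symm hkj]
          · rfl

theorem pvFoldlSet_length {α : Type} (c : Nat → Prop) [DecidablePred c] (v : Nat → α) :
    ∀ (js : List Nat) (acc : List α),
      (js.foldl (fun a j => if c j then a.set j (v j) else a) acc).length = acc.length := by
  intro js
  induction js with
  | nil => intro acc; rfl
  | cons j js ih =>
      intro acc
      rw [List.foldl_cons, ih]
      split <;> simp

theorem pvZipIdx_eq_map_range {α : Type} (d : α) (l : List α) :
    l.zipIdx = (List.range l.length).map (fun j => (l.getD j d, j)) := by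
  apply List.ext_getElem
  · simp
  · intro i h1 h2
    simp only [List.getElem_zipIdx, List.getElem_map, List.getElem_range]
    have : i < l.length := by simpa using h1
    simp [List.getD, List.getElem?_eq_getElem this]

-- pvLeadingN basic facts
theorem pvLeadingN_le (l : List String) : pvLeadingN l ≤ l.length := by
  induction l with
  | nil => simp [pvLeadingN]
  | cons a t ih =>
      by_cases h : a = "N" <;> simp [pvLeadingN, h] <;> omega

theorem pvLeadingN_getD (l : List String) : ∀ j, j < pvLeadingN l → l.getD j "" = "N" := by
  induction l with
  | nil => simp [pvLeadingN]
  | cons a t ih =>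
      intro j hj
      simp only [pvLeadingN] at hj
      by_cases ha : a = "N"
      · cases j with
        | zero => simpa using ha
        | succ j =>
            simp only [List.getD_cons_succ]
            apply ih
            simp [ha] at hj; omega
      · simp [ha] at hj

theorem pvLeadingN_ne (l : List String) (h : pvLeadingN l < l.length) :
    l.getD (pvLeadingN l) "" ≠ "N" := by
  induction l with
  | nil => simp at h
  | cons a t ih =>
      by_cases ha : a = "N"
      · have he : pvLeadingN (a :: t) = pvLeadingN t + 1 := by simp [pvLeadingN, ha]
        rw [he] at h ⊢
        simp only [List.getD_cons_succ]
        exact ih (by simp only [List.length_cons] at h; omega)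
      · have he : pvLeadingN (a :: t) = 0 := by simp [pvLeadingN, ha]
        rw [he]
        simpa using ha

-- "some index of rest, with seen-state `seen` entering rest at offset m, writes k"
def pvNK (rest : List String) (m k : Nat) (seen : Bool) : Prop :=
  ∃ j, j < rest.length ∧ k = m + j ∧ rest.getD j "" = "N" ∧
    (seen = true ∨ ∃ i, i < j ∧ rest.getD i "" ≠ "N") ∧
    (∃ i, i < rest.length ∧ j < i ∧ rest.getD i "" ≠ "N")

def pvHasNonN (rest : List String) : Prop :=
  ∃ i, i < rest.length ∧ rest.getD i "" ≠ "N"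

-- streaming-pass invariant for B, pointwise: what the fold returns at index k,
-- given the entry state (cur, seen, pending) at offset m
set_option maxHeartbeats 1000000 in
theorem pvGoB (seq : List Char) :
    ∀ (rest : List String) (m : Nat) (cur : List String) (seen : Bool) (pending : List Nat),
      (∀ p ∈ pending, p < cur.length) → (m + rest.length ≤ cur.length) →
      ∀ k, ((k < seq.length ∧ ((k ∈ pending ∧ pvHasNonN rest) ∨ pvNK rest m k seen)) →
              ((rest.zipIdx m).foldl (pvStepB seq) (cur, seen, pending)).1[k]? =
                some ("-" ++ String.mk [seq.getD k ' '])) ∧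
           (¬ (k < seq.length ∧ ((k ∈ pending ∧ pvHasNonN rest) ∨ pvNK rest m k seen)) →
              ((rest.zipIdx m).foldl (pvStepB seq) (cur, seen, pending)).1[k]? = cur[k]?) := by
  intro rest
  induction rest with
  | nil =>
      intro m cur seen pending _ _ k
      constructor
      · rintro ⟨_, ⟨_, hh⟩ | h⟩
        · exfalso
          simp only [pvHasNonN] at hh
          obtain ⟨i, hi, _⟩ := hh
          simp at hi
        · exfalso
          simp only [pvNK] at h
          obtain ⟨j, hj, _⟩ := h
          simp at hj
      · intro _; rfl
  | cons c rest ih =>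
      intro m cur seen pending hpend hlen k
      rw [show (c :: rest).zipIdx m = (c, m) :: rest.zipIdx (m + 1) from by
            simp [List.zipIdx_cons], List.foldl_cons]
      have hlen' : m + 1 + rest.length ≤ cur.length := by
        simp only [List.length_cons] at hlen; omega
      by_cases hc : c = "N"
      · have hHas : pvHasNonN rest ↔ pvHasNonN (c :: rest) := by
          simp only [pvHasNonN]
          constructor
          · rintro ⟨i, hil, hiN⟩
            exact ⟨i + 1, by simpa using hil, by simpa using hiN⟩
          · rintro ⟨i, hil, hiN⟩
            cases i with
            | zero => simp [hc] at hiN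
            | succ i => exact ⟨i, by simpa using hil, by simpa using hiN⟩
        cases seen with
        | false =>
            have hstep : pvStepB seq (cur, false, pending) (c, m) = (cur, false, pending) := by
              simp [pvStepB, hc]
            rw [hstep]
            have h2 : pvNK rest (m + 1) k false ↔ pvNK (c :: rest) m k false := by
              simp only [pvNK]
              constructor
              · rintro ⟨j, hj, hkj, hjN, hsj, i, hil, hji, hiN⟩
                refine ⟨j + 1, by simpa using hj, by omega, by simpa using hjN, ?_,
                  i + 1, by simpa using hil, by omega, by simpa using hiN⟩
                rcases hsj with h0 | ⟨i', hi', hi'N⟩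
                · simp at h0
                · exact Or.inr ⟨i' + 1, by omega, by simpa using hi'N⟩
              · rintro ⟨j, hj, hkj, hjN, hsj, i, hil, hji, hiN⟩
                cases j with
                | zero =>
                    rcases hsj with h0 | ⟨i', hi', _⟩
                    · simp at h0
                    · omega
                | succ j =>
                    cases i with
                    | zero => omega
                    | succ i =>
                        refine ⟨j, by simpa using hj, by omega, by simpa using hjN, ?_,
                          i, by simpa using hil, by omega, by simpa using hiN⟩
                        rcases hsj with h0 | ⟨i', hi', hi'N⟩
                        · simp at h0
                        · cases i' with
                          | zero => simp [hc] at hi'N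
                          | succ i' => exact Or.inr ⟨i', by omega, by simpa using hi'N⟩
            have ihk := ih (m + 1) cur false pending hpend hlen' k
            constructor
            · intro hC
              exact ihk.1 (by tauto)
            · intro hC
              exact ihk.2 (by tauto)
        | true =>
            have hstep : pvStepB seq (cur, true, pending) (c, m) =
                (cur, true, pending ++ [m]) := by
              simp [pvStepB, hc]
            have hpend' : ∀ p ∈ pending ++ [m], p < cur.length := by
              intro p hp
              rcases List.mem_append.mp hp with h | h
              · exact hpend p h
              · simp only [List.mem_singleton] at h; omega
            rw [hstep]
            have hNKgoal : pvNK (c :: rest) m k true ↔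
                (k = m ∧ pvHasNonN rest) ∨ pvNK rest (m + 1) k true := by
              simp only [pvNK, pvHasNonN]
              constructor
              · rintro ⟨j, hj, hkj, hjN, _, i, hil, hji, hiN⟩
                cases j with
                | zero =>
                    cases i with
                    | zero => omega
                    | succ i =>
                        exact Or.inl ⟨by omega, i, by simpa using hil, by simpa using hiN⟩
                | succ j =>
                    cases i with
                    | zero => omega
                    | succ i =>
                        exact Or.inr ⟨j, by simpa using hj, by omega, by simpa using hjN,
                          Or.inl trivial, i, by simpa using hil, by omega, by simpa using hiN⟩
              · rintro (⟨hkm, i, hil, hiN⟩ | ⟨j, hj, hkj, hjN, _, i, hil, hji, hiN⟩)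
                · exact ⟨0, by simp, by omega, by simpa using hc, Or.inl trivial,
                    i + 1, by simpa using hil, by omega, by simpa using hiN⟩
                · exact ⟨j + 1, by simpa using hj, by omega, by simpa using hjN, Or.inl trivial,
                    i + 1, by simpa using hil, by omega, by simpa using hiN⟩
            have hmem : k ∈ pending ++ [m] ↔ k ∈ pending ∨ k = m := by simp
            have ihk := ih (m + 1) cur true (pending ++ [m]) hpend' hlen' k
            constructor
            · intro hC
              exact ihk.1 (by tauto)
            · intro hC
              exact ihk.2 (by tauto)
      · -- a non-"N": flush the buffer
        have hstep : pvStepB seq (cur, seen, pending) (c, m) =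
            (pending.foldl
              (fun acc kk => if kk < seq.length
                  then acc.set kk ("-" ++ String.mk [seq.getD kk ' ']) else acc) cur,
             true, []) := by
          simp [pvStepB, hc]
        set cur' := pending.foldl
          (fun acc kk => if kk < seq.length
              then acc.set kk ("-" ++ String.mk [seq.getD kk ' ']) else acc) cur with hcur'
        have hclen : cur'.length = cur.length :=
          pvFoldlSet_length (fun kk => kk < seq.length) _ pending cur
        have hflush : cur'[k]? = if k ∈ pending ∧ k < seq.length
            then some ("-" ++ String.mk [seq.getD k ' ']) else cur[k]? :=
          pvFoldlSet_getElem? (fun kk => kk < seq.length) _ pending cur hpend k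
        have hNKgoal : ∀ s : Bool, pvNK (c :: rest) m k s ↔ pvNK rest (m + 1) k true := by
          intro s
          simp only [pvNK]
          constructor
          · rintro ⟨j, hj, hkj, hjN, _, i, hil, hji, hiN⟩
            cases j with
            | zero => exact absurd (by simpa using hjN) hc
            | succ j =>
                cases i with
                | zero => omega
                | succ i =>
                    exact ⟨j, by simpa using hj, by omega, by simpa using hjN, Or.inl trivial,
                      i, by simpa using hil, by omega, by simpa using hiN⟩
          · rintro ⟨j, hj, hkj, hjN, _, i, hil, hji, hiN⟩
            exact ⟨j + 1, by simpa using hj, by omega, by simpa using hjN,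
              Or.inr ⟨0, by omega, by simpa using hc⟩,
              i + 1, by simpa using hil, by omega, by simpa using hiN⟩
        have hHas : pvHasNonN (c :: rest) := by
          simp only [pvHasNonN]
          exact ⟨0, by simp, by simpa using hc⟩
        have ihk := ih (m + 1) cur' true [] (by simp) (by omega) k
        rw [hstep]
        constructor
        · rintro ⟨hks, hor⟩
          by_cases hnk : pvNK rest (m + 1) k true
          · exact ihk.1 ⟨hks, Or.inr hnk⟩
          · rcases hor with ⟨hkp, _⟩ | h
            · rw [ihk.2 (by
                    rintro ⟨_, ⟨hnil, _⟩ | h⟩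
                    · simp at hnil
                    · exact hnk h),
                  hflush, if_pos ⟨hkp, hks⟩]
            · exact absurd ((hNKgoal seen).mp h) hnk
        · intro hC
          rw [ihk.2 (by
                rintro ⟨hks, ⟨hnil, _⟩ | h⟩
                · simp at hnil
                · exact hC ⟨hks, Or.inr ((hNKgoal seen).mpr h)⟩),
              hflush, if_neg (by
                rintro ⟨hkp, hks⟩
                exact hC ⟨hks, Or.inl ⟨hkp, hHas⟩⟩)]

-- the row-level equivalence
set_option maxHeartbeats 1000000 in
theorem pvRow_eq (l : List String) (seq : List Char) : pvRowA l seq = pvRowB l seq := by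
  -- B pointwise
  have hB : ∀ k, ((k < seq.length ∧ pvNK l 0 k false) →
      (pvRowB l seq)[k]? = some ("-" ++ String.mk [seq.getD k ' '])) ∧
      (¬ (k < seq.length ∧ pvNK l 0 k false) → (pvRowB l seq)[k]? = l[k]?) := by
    intro k
    have h := pvGoB seq l 0 l false [] (by simp) (by omega) k
    constructor
    · intro hC
      exact h.1 ⟨hC.1, Or.inr hC.2⟩
    · intro hC
      refine h.2 ?_
      rintro ⟨hks, ⟨hnil, _⟩ | h'⟩
      · simp at hnil
      · exact hC ⟨hks, h'⟩
  -- A as a fold over range with a pointwise write condition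
  have hAfold : pvRowA l seq =
      (List.range (min l.length seq.length)).foldl
        (fun (acc : List String) (j : Nat) => if (pvLeadingN l : Int) ≤ (j : Int) ∧
              (j : Int) ≤ (l.length : Int) - (pvLeadingN l.reverse : Int) - 1 ∧ l.getD j "" = "N"
            then acc.set j ("-" ++ String.mk [seq.getD j ' ']) else acc) l := by
    unfold pvRowA
    rw [pvZipIdx_eq_map_range (("", ' ') : String × Char) (List.zip l seq), List.foldl_map]
    simp only [List.length_zip]
    apply PySem.List.foldl_congr_mem
    intro acc j hj
    have hj' : j < min l.length seq.length := by simpa using hj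
    have h1 : j < (List.zip l seq).length := by simpa using hj'
    have : (List.zip l seq).getD j ("", ' ') = (l.getD j "", seq.getD j ' ') := by
      rw [List.getD_eq_getElem _ _ h1, List.getElem_zip,
          List.getD_eq_getElem l "" (by omega), List.getD_eq_getElem seq ' ' (by omega)]
    rw [this]
  have hrevget : ∀ i, i < l.length → l.reverse.getD i "" = l.getD (l.length - 1 - i) "" := by
    intro i hilt
    rw [List.getD_eq_getElem _ _ (by simpa using hilt), List.getElem_reverse,
        List.getD_eq_getElem l "" (by omega)]
  have htr_le : pvLeadingN l.reverse ≤ l.length := by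
    have := pvLeadingN_le l.reverse; simpa using this
  -- the two conditions coincide
  have hiff : ∀ k, (k ∈ List.range (min l.length seq.length) ∧
        (pvLeadingN l : Int) ≤ (k : Int) ∧
        (k : Int) ≤ (l.length : Int) - (pvLeadingN l.reverse : Int) - 1 ∧
        l.getD k "" = "N") ↔ (k < seq.length ∧ pvNK l 0 k false) := by
    intro k
    rw [List.mem_range]
    simp only [pvNK]
    constructor
    · rintro ⟨hk, h2, h3, h4⟩
      have hkl : k < l.length := by omega
      have hks : k < seq.length := by omega
      have hlk : pvLeadingN l < l.length := by omega
      have hne := pvLeadingN_ne l hlk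
      have hleft : ∃ i, i < k ∧ l.getD i "" ≠ "N" := by
        rcases lt_or_eq_of_le (show pvLeadingN l ≤ k by exact_mod_cast h2) with h | h
        · exact ⟨pvLeadingN l, h, hne⟩
        · rw [h] at hne; exact absurd h4 hne
      have htrk : pvLeadingN l.reverse < l.length - 1 - k := by
        have h3' : k + pvLeadingN l.reverse + 1 ≤ l.length := by
          have := h3; push_cast at this; omega
        rcases Nat.lt_or_ge (pvLeadingN l.reverse) (l.length - 1 - k) with h | h
        · exact h
        · exfalso
          have heq : pvLeadingN l.reverse = l.length - 1 - k := by omega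
          have hne2 := pvLeadingN_ne l.reverse
            (by simpa using (show pvLeadingN l.reverse < l.length by omega))
          rw [hrevget _ (by omega), heq,
              show l.length - 1 - (l.length - 1 - k) = k from by omega] at hne2
          exact hne2 h4
      have hright : ∃ i, i < l.length ∧ k < i ∧ l.getD i "" ≠ "N" := by
        refine ⟨l.length - 1 - pvLeadingN l.reverse, by omega, by omega, ?_⟩
        have hne2 := pvLeadingN_ne l.reverse
          (by simpa using (show pvLeadingN l.reverse < l.length by omega))
        rwa [hrevget _ (by omega)] at hne2
      exact ⟨hks, k, hkl, by omega, h4, Or.inr hleft, hright⟩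
    · rintro ⟨hks, j, hj, hkj, hjN, hs, i, hil, hji, hiN⟩
      have hkj0 : k = j := by omega
      subst hkj0
      rcases hs with h0 | ⟨i', hi', hi'N⟩
      · simp at h0
      · have hleft : pvLeadingN l ≤ i' := by
          by_contra h
          exact hi'N (pvLeadingN_getD l i' (by omega))
        have htr : pvLeadingN l.reverse ≤ l.length - 1 - i := by
          by_contra h
          have hNi := pvLeadingN_getD l.reverse (l.length - 1 - i) (by omega)
          rw [hrevget _ (by omega),
              show l.length - 1 - (l.length - 1 - i) = i from by omega] at hNi
          exact hiN hNi
        refine ⟨by omega, by exact_mod_cast (show (pvLeadingN l : Int) ≤ k from by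
          push_cast; omega), ?_, hjN⟩
        push_cast
        omega
  rw [hAfold]
  apply List.ext_getElem?
  intro k
  rw [pvFoldlSet_getElem?
        (fun j => (pvLeadingN l : Int) ≤ (j : Int) ∧
          (j : Int) ≤ (l.length : Int) - (pvLeadingN l.reverse : Int) - 1 ∧ l.getD j "" = "N")
        (fun j => "-" ++ String.mk [seq.getD j ' '])
        _ l (by intro j hj; simp at hj; omega) k]
  by_cases hck : (k ∈ List.range (min l.length seq.length) ∧
      (pvLeadingN l : Int) ≤ (k : Int) ∧
      (k : Int) ≤ (l.length : Int) - (pvLeadingN l.reverse : Int) - 1 ∧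
      l.getD k "" = "N")
  · rw [if_pos hck]
    exact ((hB k).1 ((hiff k).mp hck)).symm
  · rw [if_neg hck]
    exact ((hB k).2 (fun h => hck ((hiff k).mpr h))).symm

-- ===== VERDICT (by name: the statement is the Claim_ definition above) =====
theorem replaceNtoD_py_spec : Claim_equal_replaceNtoD_py := by
  intro cssplits_sample sequence _
  unfold Spec_replaceNtoD_py replaceNtoD_py replaceNtoD_py_alt
  exact List.map_congr_left (fun l _ => pvRow_eq l sequence.toList)
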